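-- pv_equiv track=rewrite | github.com/Airheumatologist/cleaningestion | scripts/02_extract_pmc.py | classify_evidence_grade
-- ===== SOURCE A (Python) =====
-- from typing import Dict, Any, Optional, List
--
-- EVIDENCE_HIERARCHY = {
--     'meta-analysis': ('A', 1),
--     'systematic-review': ('A', 1),
--     'systematic review': ('A', 1),
--     'practice-guideline': ('A', 1),
--     'guideline': ('A', 1),
--     'randomized-controlled-trial': ('A', 2),
--     'randomized controlled trial': ('A', 2),
--     'clinical-trial': ('A', 2),
--     'clinical trial': ('A', 2),
--     'cohort-study': ('B', 3),
--     'cohort study': ('B', 3),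
--     'review': ('B', 3),
--     'case-control': ('B', 4),
--     'cross-sectional': ('B', 4),
--     'case-report': ('C', 5),
--     'case report': ('C', 5),
--     'case-series': ('C', 5),
--     'editorial': ('D', 6),
--     'letter': ('D', 6),
--     'comment': ('D', 6),
-- }
--
-- def classify_evidence_grade(article_type: str, pub_types: List[str]) -> tuple:
--     """Classify evidence grade based on article type."""
--     article_type_lower = article_type.lower().replace('_', '-').replace(' ', '-')
--     pub_types_lower = [pt.lower() for pt in pub_types]
--
--     # Check article type first
--     for pattern, (grade, level) in EVIDENCE_HIERARCHY.items():
--         if pattern in article_type_lower: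
--             return grade, level
--         for pt in pub_types_lower:
--             if pattern in pt:
--                 return grade, level
--
--     # Default
--     return 'B', 3
-- ===== SOURCE B (Python) =====
-- from typing import List
--
-- EVIDENCE_HIERARCHY = {
--     'meta-analysis': ('A', 1),
--     'systematic-review': ('A', 1),
--     'systematic review': ('A', 1),
--     'practice-guideline': ('A', 1),
--     'guideline': ('A', 1),
--     'randomized-controlled-trial': ('A', 2),
--     'randomized controlled trial': ('A', 2),
--     'clinical-trial': ('A', 2),
--     'clinical trial': ('A', 2),
--     'cohort-study': ('B', 3),
--     'cohort study': ('B', 3),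
--     'review': ('B', 3),
--     'case-control': ('B', 4),
--     'cross-sectional': ('B', 4),
--     'case-report': ('C', 5),
--     'case report': ('C', 5),
--     'case-series': ('C', 5),
--     'editorial': ('D', 6),
--     'letter': ('D', 6),
--     'comment': ('D', 6),
-- }
--
-- def classify_evidence_grade(article_type: str, pub_types: List[str]) -> tuple:
--     """Classify evidence grade: min hierarchy index matched by any text."""
--     items = list(EVIDENCE_HIERARCHY.items())
--     texts = [article_type.lower().replace('_', '-').replace(' ', '-')]
--     texts += [pt.lower() for pt in pub_types]
--     n = len(items)
--     best = n
--     for text in texts: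
--         hit = next((i for i, (p, _) in enumerate(items) if p in text), n)
--         if hit < best:
--             best = hit
--     return items[best][1] if best < n else ('B', 3)
-- ===== Notes on version B (the rewrite author's own statement) =====
-- stated objective: alternative
-- what changed: Inverted the loop nesting: instead of scanning patterns outermost with an early return, B computes for each text the index of the first hierarchy pattern it contains, takes the minimum index over all texts, and maps that index back through the hierarchy (default ('B', 3) when nothing matches).
import Mathlib
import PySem

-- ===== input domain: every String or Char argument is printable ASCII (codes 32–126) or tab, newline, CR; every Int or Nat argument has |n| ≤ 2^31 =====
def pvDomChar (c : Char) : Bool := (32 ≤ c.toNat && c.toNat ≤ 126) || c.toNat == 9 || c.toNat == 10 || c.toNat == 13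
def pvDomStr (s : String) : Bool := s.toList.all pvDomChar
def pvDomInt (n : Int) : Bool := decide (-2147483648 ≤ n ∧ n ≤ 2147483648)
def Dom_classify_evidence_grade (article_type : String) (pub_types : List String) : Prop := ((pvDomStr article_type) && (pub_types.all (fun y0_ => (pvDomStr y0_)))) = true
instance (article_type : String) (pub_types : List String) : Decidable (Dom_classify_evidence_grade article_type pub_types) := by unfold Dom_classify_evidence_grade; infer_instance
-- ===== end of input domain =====

-- B inverts the loop nesting (per-text minimal hierarchy index, then min over texts) instead of
-- A's per-pattern scan with early return; objective: alternative decomposition, same cost.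

-- EVIDENCE_HIERARCHY as an ordered association list (dict insertion order)
def evidenceHierarchy : List (String × String × Int) :=
  [("meta-analysis", ("A", 1)), ("systematic-review", ("A", 1)), ("systematic review", ("A", 1)),
   ("practice-guideline", ("A", 1)), ("guideline", ("A", 1)),
   ("randomized-controlled-trial", ("A", 2)), ("randomized controlled trial", ("A", 2)),
   ("clinical-trial", ("A", 2)), ("clinical trial", ("A", 2)),
   ("cohort-study", ("B", 3)), ("cohort study", ("B", 3)), ("review", ("B", 3)),
   ("case-control", ("B", 4)), ("cross-sectional", ("B", 4)),
   ("case-report", ("C", 5)), ("case report", ("C", 5)), ("case-series", ("C", 5)),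
   ("editorial", ("D", 6)), ("letter", ("D", 6)), ("comment", ("D", 6))]

-- ===== PORT A =====
-- inner 'for pt in pub_types_lower: if pattern in pt: return grade, level'
def aPtScan (pattern : String) : List String → Bool
  | [] => false
  | pt :: rest => if PySem.Str.isIn pattern pt then true else aPtScan pattern rest

-- outer 'for pattern, (grade, level) in EVIDENCE_HIERARCHY.items(): …'
def aLoop (al : String) (ptl : List String) : List (String × String × Int) → String × Int
  | [] => ("B", 3)
  | (pattern, gl) :: rest =>
    if PySem.Str.isIn pattern al then gl
    else if aPtScan pattern ptl then gl
    else aLoop al ptl rest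

def classify_evidence_grade (article_type : String) (pub_types : List String) : String × Int :=
  let article_type_lower :=
    PySem.Str.replace (PySem.Str.replace (PySem.Str.lower article_type) "_" "-") " " "-"
  let pub_types_lower := pub_types.map PySem.Str.lower
  aLoop article_type_lower pub_types_lower evidenceHierarchy

-- ===== PORT B =====
-- 'next((i for i, (p, _) in enumerate(items) if p in text), n)': index of first pattern in text, length if none
def bFirstHit : List (String × String × Int) → String → Nat
  | [], _ => 0
  | (p, _) :: rest, text => if PySem.Str.isIn p text then 0 else bFirstHit rest text + 1

def classify_evidence_grade_alt (article_type : String) (pub_types : List String) : String × Int :=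
  let items := evidenceHierarchy
  let texts :=
    (PySem.Str.replace (PySem.Str.replace (PySem.Str.lower article_type) "_" "-") " " "-")
      :: pub_types.map PySem.Str.lower
  let n := items.length
  let best := texts.foldl (fun b t => let hit := bFirstHit items t; if hit < b then hit else b) n
  match items[best]? with
  | some x => x.2
  | none => ("B", 3)

-- ===== PRECONDITION & SPEC =====
def Spec_classify_evidence_grade (article_type : String) (pub_types : List String) (out : String × Int) : Prop := out = classify_evidence_grade_alt article_type pub_types
instance (article_type : String) (pub_types : List String) (out : String × Int) : Decidable (Spec_classify_evidence_grade article_type pub_types out) := by unfold Spec_classify_evidence_grade; infer_instance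

-- ===== CLAIM (what is proved, stated in full; the proofs are below) =====
def Claim_equal_classify_evidence_grade : Prop := ∀ (article_type : String) (pub_types : List String), Dom_classify_evidence_grade article_type pub_types → Spec_classify_evidence_grade article_type pub_types (classify_evidence_grade article_type pub_types)

-- ===== LEMMAS AND PROOFS =====

theorem aPtScan_eq_any (p : String) (l : List String) :
    aPtScan p l = l.any (fun t => PySem.Str.isIn p t) := by
  induction l with
  | nil => rfl
  | cons pt rest ih => simp [aPtScan, ih]

-- the running 'if hit < best' minimum is a fold of Nat.min over the mapped hits
theorem foldl_if_lt_eq_foldl_min (f : String → Nat) (ts : List String) (acc : Nat) :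
    ts.foldl (fun b t => let hit := f t; if hit < b then hit else b) acc
      = (ts.map f).foldl min acc := by
  induction ts generalizing acc with
  | nil => rfl
  | cons t ts ih =>
      simp only [List.foldl_cons, List.map_cons, ih]
      congr 1
      simp only [min_def]
      split_ifs <;> omega

theorem foldl_min_zero (l : List Nat) : l.foldl min 0 = 0 := by
  induction l with
  | nil => rfl
  | cons x l ih => simpa using ih

-- peeling one pattern off the hierarchy shifts the per-text minimum by one unless some text matches it
theorem foldl_min_succ (c : String → Bool) (g : String → Nat) (ts : List String) (m : Nat) :
    (ts.map (fun t => if c t then 0 else g t + 1)).foldl min (m + 1)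
      = if ts.any c then 0 else (ts.map g).foldl min m + 1 := by
  induction ts generalizing m with
  | nil => simp
  | cons t ts ih =>
      simp only [List.map_cons, List.foldl_cons, List.any_cons]
      by_cases h : c t = true
      · simp [h, foldl_min_zero]
      · rw [Bool.not_eq_true] at h
        rw [h]
        have hmin : min (m + 1) (if false = true then 0 else g t + 1) = min m (g t) + 1 := by
          simp [Nat.succ_min_succ]
        rw [hmin, ih]
        simp

-- core equivalence: A's pattern-outer scan equals B's min-over-texts index lookup, for any hierarchy
theorem main_lemma (items : List (String × String × Int)) (al : String) (ptl : List String) :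
    aLoop al ptl items
      = (match items[(al :: ptl).foldl
            (fun b t => let hit := bFirstHit items t; if hit < b then hit else b) items.length]? with
         | some x => x.2
         | none => ("B", 3)) := by
  induction items with
  | nil =>
      rw [foldl_if_lt_eq_foldl_min]
      simp [aLoop, bFirstHit, foldl_min_zero]
  | cons hd rest ih =>
      obtain ⟨p, gl⟩ := hd
      rw [foldl_if_lt_eq_foldl_min]
      have hf : bFirstHit ((p, gl) :: rest) =
          fun t => if PySem.Str.isIn p t then 0 else bFirstHit rest t + 1 := rfl
      rw [hf]
      have hlen : ((p, gl) :: rest).length = rest.length + 1 := rfl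
      rw [hlen, foldl_min_succ (fun t => PySem.Str.isIn p t) (bFirstHit rest) (al :: ptl) rest.length]
      by_cases h : (al :: ptl).any (fun t => PySem.Str.isIn p t) = true
      · rw [h, if_pos rfl]
        rcases (by simpa using h :
            PySem.Chars.isIn p.toList al.toList = true
              ∨ ∃ x ∈ ptl, PySem.Chars.isIn p.toList x.toList = true) with h1 | h1
        · simp [aLoop, h1]
        · have h2 : aPtScan p ptl = true := by
            rw [aPtScan_eq_any]; simpa using h1
          simp [aLoop, h2]
      · rw [Bool.not_eq_true] at h
        rw [h]
        simp only [List.any_cons, Bool.or_eq_false_iff] at h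
        obtain ⟨h1, h2⟩ := h
        have h1c : PySem.Chars.isIn p.toList al.toList = false := by simpa using h1
        have h2c : aPtScan p ptl = false := by rw [aPtScan_eq_any]; exact h2
        have hA : aLoop al ptl ((p, gl) :: rest) = aLoop al ptl rest := by
          simp [aLoop, h1c, h2c]
        rw [hA, ih, foldl_if_lt_eq_foldl_min]
        simp only [if_neg (by simp : ¬ (false = true)), List.getElem?_cons_succ]

-- ===== VERDICT (by name: the statement is the Claim_ definition above) =====
theorem classify_evidence_grade_spec : Claim_equal_classify_evidence_grade := by
  intro article_type pub_types _
  unfold Spec_classify_evidence_grade classify_evidence_grade classify_evidence_grade_alt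
  exact main_lemma evidenceHierarchy _ _
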